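-- pv_equiv track=rewrite | github.com/loseys/Oblivion | Windows/etc/api/intelligencex.py | caracter_win
-- ===== SOURCE A (Python) =====
-- def caracter_win(arquivo_w):
--     """
--     Clears the bad characters of the data leak file/Limpa alguns caractéres do arquivo do vazamento de dados que poderão
--     gerar alguns erros.
--
--     :param arquivo_w: Path file/Local do arquivo
--     :return: Returns the "cleaned" file/Retorna o arquivo "limpo".
--     """
--     arquivo_w = str(arquivo_w)
--     arquivo_w = arquivo_w.strip()
--     arquivo_w = arquivo_w.rstrip()
--     arquivo_w = arquivo_w.replace('\\','')
--     arquivo_w = arquivo_w.replace('\r','')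
--     arquivo_w = arquivo_w.replace('\n','')
--     arquivo_w = arquivo_w.replace('/', '')
--     arquivo_w = arquivo_w.replace('//', '')
--     letras_numeros = ['a', 'b', 'c', 'd', 'e', 'f', 'g', 'h', 'i', 'j', 'k', 'l', 'm', 'n', 'o', 'p', 'q', 'r', 's',
--                       't', 'u', 'v', 'x', 'A', 'B', 'C', 'D', 'E', 'F', 'G', 'H', 'I', 'J', 'K', 'L', 'M', 'N', 'O',
--                       'P', 'Q', 'R', 'S', 'T', 'U', 'V', 'W', 'X', 'Y', 'Z', '1', '2', '3', '4', '5', '6', '7', '8',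
--                       '9', '0', ' ']
--     for i in arquivo_w:
--
--         if i not in letras_numeros:
--             arquivo_w = arquivo_w.replace(i, '')
--
--     return arquivo_w
-- ===== SOURCE B (Python) =====
-- ALLOWED = frozenset('abcdefghijklmnopqrstuvxABCDEFGHIJKLMNOPQRSTUVWXYZ1234567890 ')
--
--
-- def caracter_win(arquivo_w):
--     return ''.join(c for c in str(arquivo_w).strip() if c in ALLOWED)
-- ===== Notes on version B (the rewrite author's own statement) =====
-- stated objective: faster
-- what changed: Replaces A's strip/rstrip, four redundant replace() passes and the per-character loop that calls str.replace on the whole string for every disallowed character with a single strip plus one join-over-generator pass filtering by frozenset membership.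
import Mathlib
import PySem

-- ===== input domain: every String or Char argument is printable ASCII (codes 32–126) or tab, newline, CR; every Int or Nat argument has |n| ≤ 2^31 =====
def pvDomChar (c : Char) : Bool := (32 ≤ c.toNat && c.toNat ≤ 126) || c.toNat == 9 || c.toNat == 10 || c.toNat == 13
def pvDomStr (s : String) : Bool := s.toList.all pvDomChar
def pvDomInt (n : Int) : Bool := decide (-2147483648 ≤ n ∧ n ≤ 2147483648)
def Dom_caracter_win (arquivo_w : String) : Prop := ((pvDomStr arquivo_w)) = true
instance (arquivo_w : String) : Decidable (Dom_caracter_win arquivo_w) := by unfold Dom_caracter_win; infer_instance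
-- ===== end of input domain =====

-- B replaces A's per-character loop that calls str.replace on the whole string by one strip plus a single filtering pass (faster).

-- ===== PORT A =====
def pvAllowA : List Char :=
  ['a', 'b', 'c', 'd', 'e', 'f', 'g', 'h', 'i', 'j', 'k', 'l', 'm', 'n', 'o', 'p', 'q', 'r', 's',
   't', 'u', 'v', 'x', 'A', 'B', 'C', 'D', 'E', 'F', 'G', 'H', 'I', 'J', 'K', 'L', 'M', 'N', 'O',
   'P', 'Q', 'R', 'S', 'T', 'U', 'V', 'W', 'X', 'Y', 'Z', '1', '2', '3', '4', '5', '6', '7', '8',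
   '9', '0', ' ']

def caracter_win (arquivo_w : String) : String :=
  let s1 := PySem.Str.strip arquivo_w
  let s2 := PySem.Str.rstrip s1
  let s3 := PySem.Str.replace s2 "\\" ""
  let s4 := PySem.Str.replace s3 "\r" ""
  let s5 := PySem.Str.replace s4 "\n" ""
  let s6 := PySem.Str.replace s5 "/" ""
  let s7 := PySem.Str.replace s6 "//" ""
  -- 'for i in arquivo_w' iterates over the string as it is at loop entry (s7) while the variable is rebound
  s7.toList.foldl
    (fun acc i => if pvAllowA.contains i then acc else PySem.Str.replace acc (String.ofList [i]) "") s7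

-- ===== PORT B =====
def pvAllowedB : String := "abcdefghijklmnopqrstuvxABCDEFGHIJKLMNOPQRSTUVWXYZ1234567890 "

-- ''.join(c for c in str(arquivo_w).strip() if c in ALLOWED); 'c in ALLOWED' is set membership of the character
def caracter_win_alt (arquivo_w : String) : String :=
  String.ofList ((PySem.Str.strip arquivo_w).toList.filter (fun c => pvAllowedB.toList.contains c))

-- ===== PRECONDITION & SPEC =====
def Spec_caracter_win (arquivo_w : String) (out : String) : Prop := out = caracter_win_alt arquivo_w
instance (arquivo_w : String) (out : String) : Decidable (Spec_caracter_win arquivo_w out) := by unfold Spec_caracter_win; infer_instance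

-- ===== CLAIM (what is proved, stated in full; the proofs are below) =====
def Claim_equal_caracter_win : Prop := ∀ (arquivo_w : String), Dom_caracter_win arquivo_w → Spec_caracter_win arquivo_w (caracter_win arquivo_w)

-- ===== LEMMAS AND PROOFS =====

-- single-character pattern, empty replacement: replace deletes every occurrence
theorem rep_go_filter (c : Char) : ∀ (fuel : Nat) (l acc : List Char), l.length ≤ fuel →
    PySem.Chars.replace.go [c] [] fuel l acc = acc.reverse ++ l.filter (· ≠ c) := by
  intro fuel
  induction fuel with
  | zero =>
    intro l acc h
    have : l = [] := List.eq_nil_of_length_eq_zero (Nat.le_zero.mp h)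
    subst this; simp [PySem.Chars.replace.go]
  | succ f ih =>
    intro l acc h
    cases l with
    | nil => simp [PySem.Chars.replace.go]
    | cons x t =>
      simp only [PySem.Chars.replace.go]
      by_cases hx : c = x
      · subst hx
        have hp : [c].isPrefixOf (c :: t) = true := by simp [List.isPrefixOf]
        rw [if_pos hp]
        simp only [List.reverse_nil, List.nil_append, List.length_singleton, List.drop_one,
          List.tail_cons]
        rw [ih t acc (by simpa using h)]
        simp
      · have hp : [c].isPrefixOf (x :: t) = false := by
          simp [List.isPrefixOf]; exact fun h' => hx h'
        rw [if_neg (by simp [hp])]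
        rw [ih t (x :: acc) (by simpa using h)]
        simp [Ne.symm hx]

theorem replace_single (c : Char) (l : List Char) :
    PySem.Chars.replace l [c] [] = l.filter (· ≠ c) := by
  simp [PySem.Chars.replace]
  rw [rep_go_filter c l.length l [] (le_refl _)]
  simp

-- pattern absent: replace is the identity (used for the '//' pass on a string with no '/')
theorem rep_go_id (c d : Char) : ∀ (fuel : Nat) (l acc : List Char), l.length ≤ fuel → c ∉ l →
    PySem.Chars.replace.go [c, d] [] fuel l acc = acc.reverse ++ l := by
  intro fuel
  induction fuel with
  | zero =>
    intro l acc h _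
    have : l = [] := List.eq_nil_of_length_eq_zero (Nat.le_zero.mp h)
    subst this; simp [PySem.Chars.replace.go]
  | succ f ih =>
    intro l acc h hc
    cases l with
    | nil => simp [PySem.Chars.replace.go]
    | cons x t =>
      have hx : c ≠ x := fun h' => hc (h' ▸ List.mem_cons_self ..)
      simp only [PySem.Chars.replace.go]
      have hp : [c, d].isPrefixOf (x :: t) = false := by
        simp [List.isPrefixOf]; exact fun h' => absurd h' hx
      rw [if_neg (by simp [hp])]
      rw [ih t (x :: acc) (by simpa using h) (fun h' => hc (List.mem_cons_of_mem _ h'))]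
      simp

theorem replace_absent (c d : Char) (l : List Char) (hc : c ∉ l) :
    PySem.Chars.replace l [c, d] [] = l := by
  simp [PySem.Chars.replace]
  rw [rep_go_id c d l.length l [] (le_refl _) hc]
  simp

-- rstrip is idempotent, so A's strip-then-rstrip is strip
theorem rstrip_strip (s : List Char) :
    PySem.Chars.rstrip (PySem.Chars.strip s) = PySem.Chars.strip s := by
  simp [PySem.Chars.strip, PySem.Chars.rstrip, List.dropWhile_idempotent]

-- the String-state loop computed on the list side
theorem loop_toList (l : List Char) : ∀ (s : String),
    (l.foldl (fun acc i => if pvAllowA.contains i then acc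
                           else PySem.Str.replace acc (String.ofList [i]) "") s).toList
      = l.foldl (fun acc i => if pvAllowA.contains i then acc
                              else PySem.Chars.replace acc [i] []) s.toList := by
  induction l with
  | nil => intro s; rfl
  | cons c t ih =>
    intro s
    simp only [List.foldl]
    by_cases h : pvAllowA.contains c
    · rw [if_pos h, if_pos h, ih]
    · rw [if_neg h, if_neg h, ih]
      congr 1
      simp

-- each iteration of the list-level loop filters one disallowed character out of the accumulator
theorem loop_filter : ∀ (l acc : List Char),
    l.foldl (fun a i => if pvAllowA.contains i then a else a.filter (· ≠ i)) acc
      = acc.filter (fun x => pvAllowA.contains x || !l.contains x) := by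
  intro l
  induction l with
  | nil => intro acc; simp
  | cons c t ih =>
    intro acc
    simp only [List.foldl]
    by_cases h : pvAllowA.contains c
    · rw [if_pos h, ih]
      apply List.filter_congr
      intro x _
      by_cases hx : x = c
      · subst hx
        have hx' : x ∈ pvAllowA := by simpa using h
        simp [hx']
      · simp [hx]
    · rw [if_neg h, ih, List.filter_filter]
      apply List.filter_congr
      intro x _
      by_cases hx : x = c
      · subst hx
        have hx' : x ∉ pvAllowA := fun h' => h (by simpa using h')
        simp [hx']
      · simp [hx]

-- characters A's pre-passes delete are not in the allowlist
theorem allow_ne (x : Char) (h : pvAllowA.contains x = true) :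
    x ≠ '\\' ∧ x ≠ '\r' ∧ x ≠ '\n' ∧ x ≠ '/' := by
  have hx : x ∈ pvAllowA := by simpa using h
  fin_cases hx <;> decide

theorem allowB_eq_allowA : pvAllowedB.toList = pvAllowA := by decide

theorem caracter_win_spec : Claim_equal_caracter_win := by
  intro s _
  unfold Spec_caracter_win caracter_win caracter_win_alt
  apply String.toList_inj.mp
  rw [loop_toList]
  simp only [PySem.Str.toList_replace, PySem.Str.toList_rstrip, PySem.Str.toList_strip,
    String.toList_ofList]
  rw [rstrip_strip]
  have e1 : ("\\" : String).toList = ['\\'] := rfl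
  have e2 : ("\r" : String).toList = ['\r'] := rfl
  have e3 : ("\n" : String).toList = ['\n'] := rfl
  have e4 : ("/" : String).toList = ['/'] := rfl
  have e5 : ("//" : String).toList = ['/', '/'] := rfl
  have e0 : ("" : String).toList = [] := rfl
  simp only [e0, e1, e2, e3, e4, e5, replace_single]
  set M := ((((PySem.Chars.strip s.toList).filter (· ≠ '\\')).filter (· ≠ '\r')).filter (· ≠ '\n')).filter (· ≠ '/') with hM
  have hslash : '/' ∉ M := by simp [hM]
  rw [replace_absent _ _ _ hslash, loop_filter]
  have hmemf : M.filter (fun x => pvAllowA.contains x || !M.contains x)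
      = M.filter (fun x => pvAllowA.contains x) := by
    apply List.filter_congr
    intro x hx
    simp [hx]
  rw [hmemf, allowB_eq_allowA, hM]
  simp only [List.filter_filter]
  apply List.filter_congr
  intro x _
  by_cases hx : pvAllowA.contains x
  · obtain ⟨h1, h2, h3, h4⟩ := allow_ne x hx
    simp [h1, h2, h3, h4]
  · have hx' : x ∉ pvAllowA := fun h' => hx (by simpa using h')
    simp [hx']
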